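-- pv_equiv track=rewrite | github.com/RodneeGlenMartin/Group14-Coin-Toss | Archived_Analysis/step_surface.py | cumulative_ht
-- ===== SOURCE A (Python) =====
-- def cumulative_ht(tosses):
--     cum_h, cum_t = [], []
--     h, t = 0, 0
--     for v in tosses:
--         if v == 1:
--             h += 1
--         else:
--             t += 1
--         cum_h.append(h)
--         cum_t.append(t)
--     return cum_h, cum_t
-- ===== SOURCE B (Python) =====
-- def cumulative_ht(tosses):
--     ones = [1 if v == 1 else 0 for v in tosses]
--     cum_h = []
--     total = 0
--     for x in ones:
--         total += x
--         cum_h.append(total)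
--     cum_t = [i + 1 - x for i, x in enumerate(cum_h)]
--     return cum_h, cum_t
-- ===== Notes on version B (the rewrite author's own statement) =====
-- stated objective: alternative
-- what changed: B works in three staged passes - map each toss to a 0/1 head indicator, take running sums of that indicator list, then reconstruct the tail counts arithmetically from the index (cum_t[i] = i+1 - cum_h[i]) - instead of A's single loop tracking two counters and appending to two lists in lockstep.
import Mathlib
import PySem

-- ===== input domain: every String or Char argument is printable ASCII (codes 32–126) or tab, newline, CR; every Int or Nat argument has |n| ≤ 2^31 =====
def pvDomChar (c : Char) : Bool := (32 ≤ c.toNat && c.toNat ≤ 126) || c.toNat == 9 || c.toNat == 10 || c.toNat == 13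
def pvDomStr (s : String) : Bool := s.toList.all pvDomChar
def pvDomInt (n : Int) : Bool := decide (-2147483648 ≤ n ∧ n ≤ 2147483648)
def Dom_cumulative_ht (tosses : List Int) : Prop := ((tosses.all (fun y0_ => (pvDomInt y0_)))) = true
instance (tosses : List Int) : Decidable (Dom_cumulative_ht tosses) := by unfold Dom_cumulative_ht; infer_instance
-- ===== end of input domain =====

-- B stages three passes: map tosses to 0/1 head indicators, running-sum them, derive tails from the index; A's single loop tracks two counters and appends to two lists.

-- ===== PORT A =====
-- the loop: state (cum_h, cum_t, h, t); each step increments one counter and appends both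
def cumulative_ht (tosses : List Int) : List Int × List Int :=
  let st := tosses.foldl
    (fun (s : List Int × List Int × Int × Int) v =>
      let h := if v = 1 then s.2.2.1 + 1 else s.2.2.1
      let t := if v = 1 then s.2.2.2 else s.2.2.2 + 1
      (s.1 ++ [h], s.2.1 ++ [t], h, t))
    ([], [], 0, 0)
  (st.1, st.2.1)

-- ===== PORT B =====
def cumulative_ht_alt (tosses : List Int) : List Int × List Int :=
  let ones := tosses.map (fun v => if v = 1 then (1 : Int) else 0)
  let st := ones.foldl
    (fun (s : List Int × Int) x => (s.1 ++ [s.2 + x], s.2 + x))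
    ([], 0)
  let cum_h := st.1
  let cum_t := (PySem.List.enumerate cum_h).map (fun p => p.1 + 1 - p.2)
  (cum_h, cum_t)

-- ===== PRECONDITION & SPEC =====
def Spec_cumulative_ht (tosses : List Int) (out : List Int × List Int) : Prop := out = cumulative_ht_alt tosses
instance (tosses : List Int) (out : List Int × List Int) : Decidable (Spec_cumulative_ht tosses out) := by unfold Spec_cumulative_ht; infer_instance

-- ===== CLAIM (what is proved, stated in full; the proofs are below) =====
def Claim_equal_cumulative_ht : Prop := ∀ (tosses : List Int), Dom_cumulative_ht tosses → Spec_cumulative_ht tosses (cumulative_ht tosses)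

-- ===== LEMMAS AND PROOFS =====

-- front-building recursion computing A's two lists from counter seeds h, t
def goA (l : List Int) (h t : Int) : List Int × List Int :=
  match l with
  | [] => ([], [])
  | v :: r =>
    let h' := if v = 1 then h + 1 else h
    let t' := if v = 1 then t else t + 1
    let p := goA r h' t'
    (h' :: p.1, t' :: p.2)

lemma foldA_eq (l : List Int) : ∀ (ch ct : List Int) (h t : Int),
    l.foldl
      (fun (s : List Int × List Int × Int × Int) v =>
        let h := if v = 1 then s.2.2.1 + 1 else s.2.2.1
        let t := if v = 1 then s.2.2.2 else s.2.2.2 + 1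
        (s.1 ++ [h], s.2.1 ++ [t], h, t))
      (ch, ct, h, t)
    = (ch ++ (goA l h t).1, ct ++ (goA l h t).2,
       (l.foldl (fun (s : List Int × List Int × Int × Int) v =>
        let h := if v = 1 then s.2.2.1 + 1 else s.2.2.1
        let t := if v = 1 then s.2.2.2 else s.2.2.2 + 1
        (s.1 ++ [h], s.2.1 ++ [t], h, t)) (ch, ct, h, t)).2.2) := by
  induction l with
  | nil => intro ch ct h t; simp [goA]
  | cons v r ih =>
    intro ch ct h t
    simp only [List.foldl, goA]
    rw [ih]
    simp [List.append_assoc]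

-- front-building recursion computing B's running-sum list from seed h
def goB (l : List Int) (h : Int) : List Int :=
  match l with
  | [] => []
  | v :: r =>
    let h' := h + (if v = 1 then 1 else 0)
    h' :: goB r h'

lemma foldB_eq (l : List Int) : ∀ (ch : List Int) (h : Int),
    (l.map (fun v => if v = 1 then (1 : Int) else 0)).foldl
      (fun (s : List Int × Int) x => (s.1 ++ [s.2 + x], s.2 + x)) (ch, h)
    = (ch ++ goB l h,
       ((l.map (fun v => if v = 1 then (1 : Int) else 0)).foldl
        (fun (s : List Int × Int) x => (s.1 ++ [s.2 + x], s.2 + x)) (ch, h)).2) := by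
  induction l with
  | nil => intro ch h; simp [goB]
  | cons v r ih =>
    intro ch h
    simp only [List.map_cons, List.foldl, goB]
    rw [ih]
    simp [List.append_assoc]

lemma goA_fst (l : List Int) : ∀ (h t : Int), (goA l h t).1 = goB l h := by
  induction l with
  | nil => intro h t; simp [goA, goB]
  | cons v r ih =>
    intro h t
    simp only [goA, goB]
    have hh : (if v = 1 then h + 1 else h) = h + (if v = 1 then 1 else 0) := by
      split <;> ring
    rw [hh, ih]

lemma enumerate_shift (xs : List Int) : ∀ (s : Int),
    PySem.List.enumerate xs s = (PySem.List.enumerate xs 0).map (fun p => (p.1 + s, p.2)) := by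
  induction xs with
  | nil => intro s; simp [PySem.List.enumerate_nil]
  | cons x r ih =>
    intro s
    rw [PySem.List.enumerate_cons, PySem.List.enumerate_cons, List.map_cons,
        ih (s + 1), ih (0 + 1), List.map_map]
    congr 1
    · simp
    · apply List.map_congr_left
      intro p _
      simp
      ring

lemma goA_snd (l : List Int) : ∀ (h t : Int),
    (goA l h t).2
      = (PySem.List.enumerate (goA l h t).1).map (fun p => p.1 + 1 + t + h - p.2) := by
  induction l with
  | nil => intro h t; simp [goA, PySem.List.enumerate_nil]
  | cons v r ih =>
    intro h t
    simp only [goA, PySem.List.enumerate_cons, List.map_cons]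
    congr 1
    · split <;> ring
    · rw [ih, enumerate_shift _ (0 + 1), List.map_map]
      apply List.map_congr_left
      intro p _
      simp only [Function.comp]
      split <;> ring

-- ===== VERDICT (by name: the statement is the Claim_ definition above) =====
theorem cumulative_ht_spec : Claim_equal_cumulative_ht := by
  intro tosses _
  show _ = _
  simp only [cumulative_ht, cumulative_ht_alt]
  rw [foldA_eq, foldB_eq]
  simp only [List.nil_append]
  rw [goA_snd tosses 0 0, goA_fst]
  congr 1
  apply List.map_congr_left
  intro p _
  ring
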